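-- pv_equiv track=rewrite | github.com/useparagon/enterprise | transform_confluence.py | parse_changelog_entries
-- ===== SOURCE A (Python) =====
-- def parse_changelog_entries(text):
--     """Parse deployment changelog text into individual entries.
--
--     Entries are separated by blank lines followed by a new top-level bullet.
--     Indented content (code blocks, sub-bullets) belongs to the current entry.
--     """
--     entries = []
--     current_entry = []
--     in_code_block = False
--     blank_buffer = []
--
--     for line in text.split('\n'):
--         stripped = line.strip()
--
--         if stripped.startswith('```'):
--             if blank_buffer:
--                 current_entry.extend(blank_buffer)
--                 blank_buffer = []
--             in_code_block = not in_code_block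
--             current_entry.append(line)
--             continue
--
--         if in_code_block:
--             current_entry.append(line)
--             continue
--
--         if stripped == '':
--             blank_buffer.append(line)
--             continue
--
--         is_top_level_bullet = stripped.startswith('* ') and not line.startswith('    ')
--         is_indented = line.startswith('    ') or line.startswith('\t')
--
--         if blank_buffer:
--             if is_indented or (not is_top_level_bullet and not stripped.startswith('# ')):
--                 current_entry.extend(blank_buffer)
--                 blank_buffer = []
--                 current_entry.append(line)
--             elif is_top_level_bullet:
--                 if current_entry:
--                     entries.append('\n'.join(current_entry).strip())
--                 current_entry = [line]
--                 blank_buffer = []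
--             else:
--                 if current_entry:
--                     entries.append('\n'.join(current_entry).strip())
--                 current_entry = [line]
--                 blank_buffer = []
--         else:
--             current_entry.append(line)
--
--     if current_entry:
--         result = '\n'.join(current_entry).strip()
--         if result:
--             entries.append(result)
--
--     return entries
-- ===== SOURCE B (Python) =====
-- def parse_changelog_entries(text):
--     """Parse deployment changelog text into individual entries.
--
--     Two stages: first cut the line list into blocks (a run of blank lines
--     followed by a run of content lines, with blanks inside code fences kept
--     in the content run), then fold the blocks into entries, opening a new
--     entry at each block that begins with a top-level bullet or heading.
--     """
--     # Stage 1: group lines into (preceding_blanks, body) blocks.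
--     blocks = []
--     blanks = []
--     body = []
--     in_code = False
--     for line in text.split('\n'):
--         s = line.strip()
--         if s.startswith('```'):
--             in_code = not in_code
--             body.append(line)
--         elif in_code or s != '':
--             body.append(line)
--         elif body:
--             blocks.append((blanks, body))
--             blanks = [line]
--             body = []
--         else:
--             blanks.append(line)
--     blocks.append((blanks, body))
--
--     def opens_entry(line):
--         s = line.strip()
--         indented = line.startswith('    ') or line.startswith('\t')
--         return not indented and (s.startswith('* ') or s.startswith('# '))
--
--     # Stage 2: fold blocks into entries.
--     entries = []
--     current = []
--     for blanks, body in blocks: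
--         if not body:
--             continue
--         if blanks and opens_entry(body[0]):
--             if current:
--                 entries.append('\n'.join(current).strip())
--             current = body
--         else:
--             current = current + blanks + body
--     if current:
--         result = '\n'.join(current).strip()
--         if result:
--             entries.append(result)
--     return entries
-- ===== Notes on version B (the rewrite author's own statement) =====
-- stated objective: alternative
-- what changed: Replaced A's single-pass state machine (blank-buffer + per-line branch logic) by a two-stage pipeline: one pass cuts the lines into (blank-run, body) blocks respecting code fences, then a fold over blocks decides per block whether it opens a new entry.
import Mathlib
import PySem

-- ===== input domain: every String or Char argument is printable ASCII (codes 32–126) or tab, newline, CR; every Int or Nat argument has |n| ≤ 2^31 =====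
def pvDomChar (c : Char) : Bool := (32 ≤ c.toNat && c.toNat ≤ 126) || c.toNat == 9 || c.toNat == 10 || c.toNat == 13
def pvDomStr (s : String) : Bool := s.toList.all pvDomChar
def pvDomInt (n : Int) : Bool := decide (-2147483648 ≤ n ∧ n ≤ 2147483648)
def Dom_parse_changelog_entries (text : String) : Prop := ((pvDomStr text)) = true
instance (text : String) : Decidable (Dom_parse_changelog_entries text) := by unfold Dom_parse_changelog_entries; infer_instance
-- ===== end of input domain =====

-- B re-decomposes A's one-pass blank-buffer state machine into a cut-into-blocks pass followed by a fold of blocks into entries; same cost, different structure.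

-- ===== PORT A =====
-- loop body of A's single for-loop; state = (entries, current_entry, in_code_block, blank_buffer)
def pvAStep (st : List String × List String × Bool × List String) (line : String) :
    List String × List String × Bool × List String :=
  match st with
  | (entries, current, inCode, blanks) =>
    let stripped := PySem.Str.strip line
    if PySem.Str.startswith stripped "```" then
      if !blanks.isEmpty then
        (entries, (current ++ blanks) ++ [line], !inCode, [])
      else
        (entries, current ++ [line], !inCode, blanks)
    else if inCode then
      (entries, current ++ [line], inCode, blanks)
    else if stripped == "" then
      (entries, current, inCode, blanks ++ [line])
    else
      let isBullet := PySem.Str.startswith stripped "* " && !(PySem.Str.startswith line "    ")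
      let isIndented := PySem.Str.startswith line "    " || PySem.Str.startswith line "\t"
      if !blanks.isEmpty then
        if isIndented || (!isBullet && !(PySem.Str.startswith stripped "# ")) then
          (entries, (current ++ blanks) ++ [line], inCode, [])
        else if isBullet then
          ((if !current.isEmpty then entries ++ [PySem.Str.strip (PySem.Str.join "\n" current)] else entries),
            [line], inCode, [])
        else
          ((if !current.isEmpty then entries ++ [PySem.Str.strip (PySem.Str.join "\n" current)] else entries),
            [line], inCode, [])
      else
        (entries, current ++ [line], inCode, blanks)

-- A's code after the loop
def pvAFin (st : List String × List String × Bool × List String) : List String :=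
  match st with
  | (entries, current, _, _) =>
    if !current.isEmpty then
      if PySem.Str.strip (PySem.Str.join "\n" current) == "" then entries
      else entries ++ [PySem.Str.strip (PySem.Str.join "\n" current)]
    else entries

def parse_changelog_entries (text : String) : List String :=
  pvAFin (((PySem.Str.split? text "\n").getD []).foldl pvAStep ([], [], false, []))

-- ===== PORT B =====
-- stage 1 loop body: state = (blocks, blanks, body, in_code)
def pvBCut (st : List (List String × List String) × List String × List String × Bool) (line : String) :
    List (List String × List String) × List String × List String × Bool :=
  match st with
  | (blocks, blanks, body, inCode) =>
    let s := PySem.Str.strip line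
    if PySem.Str.startswith s "```" then
      (blocks, blanks, body ++ [line], !inCode)
    else if inCode || !(s == "") then
      (blocks, blanks, body ++ [line], inCode)
    else if !body.isEmpty then
      (blocks ++ [(blanks, body)], [line], ([] : List String), inCode)
    else
      (blocks, blanks ++ [line], body, inCode)

def pvOpensEntry (line : String) : Bool :=
  let s := PySem.Str.strip line
  let indented := PySem.Str.startswith line "    " || PySem.Str.startswith line "\t"
  !indented && (PySem.Str.startswith s "* " || PySem.Str.startswith s "# ")

-- stage 2 loop body: state = (entries, current)
def pvBApply (st : List String × List String) (blk : List String × List String) :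
    List String × List String :=
  match st, blk with
  | (entries, current), (blanks, body) =>
    match body with
    | [] => (entries, current)
    | first :: _ =>
      if !blanks.isEmpty && pvOpensEntry first then
        ((if !current.isEmpty then entries ++ [PySem.Str.strip (PySem.Str.join "\n" current)] else entries),
          body)
      else
        (entries, (current ++ blanks) ++ body)

-- B's code after the second loop
def pvBFin (st : List String × List String) : List String :=
  match st with
  | (entries, current) =>
    if !current.isEmpty then
      if PySem.Str.strip (PySem.Str.join "\n" current) == "" then entries
      else entries ++ [PySem.Str.strip (PySem.Str.join "\n" current)]
    else entries

def parse_changelog_entries_alt (text : String) : List String :=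
  match ((PySem.Str.split? text "\n").getD []).foldl pvBCut ([], [], [], false) with
  | (blocks, blanks, body, _) =>
    pvBFin ((blocks ++ [(blanks, body)]).foldl pvBApply ([], []))

-- ===== PRECONDITION & SPEC =====
def Spec_parse_changelog_entries (text : String) (out : List String) : Prop := out = parse_changelog_entries_alt text
instance (text : String) (out : List String) : Decidable (Spec_parse_changelog_entries text out) := by unfold Spec_parse_changelog_entries; infer_instance

-- ===== CLAIM =====
def Claim_equal_parse_changelog_entries : Prop := ∀ (text : String), Dom_parse_changelog_entries text → Spec_parse_changelog_entries text (parse_changelog_entries text)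

-- ===== LEMMAS AND PROOFS =====

-- A's mid-loop state corresponding to B's in-progress block (blanks b, body d):
-- with an open body A has already folded the block into (entries, current) and its blank buffer is empty.
def pvFlat (e c b d : List String) (icb : Bool) : List String × List String × Bool × List String :=
  match d with
  | [] => (e, c, icb, b)
  | _ :: _ => ((pvBApply (e, c) (b, d)).1, (pvBApply (e, c) (b, d)).2, icb, [])

lemma pvBCut_step (bs : List (List String × List String)) (b d : List String) (icb : Bool) (line : String) :
    pvBCut (bs, b, d, icb) line =
      (bs ++ (pvBCut ([], b, d, icb) line).1, (pvBCut ([], b, d, icb) line).2) := by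
  simp only [pvBCut]
  split_ifs <;> simp

lemma pvBCut_blocks (lines : List String) :
    ∀ (bs : List (List String × List String)) (b d : List String) (icb : Bool),
    lines.foldl pvBCut (bs, b, d, icb) =
      (bs ++ (lines.foldl pvBCut ([], b, d, icb)).1, (lines.foldl pvBCut ([], b, d, icb)).2) := by
  induction lines with
  | nil => intro bs b d icb; simp
  | cons line rest ih =>
    intro bs b d icb
    simp only [List.foldl_cons]
    rw [pvBCut_step]
    rcases h : pvBCut ([], b, d, icb) line with ⟨p1, p2, p3, p4⟩
    dsimp only
    rw [ih (bs ++ p1) p2 p3 p4, ih p1 p2 p3 p4]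
    simp [List.append_assoc]

lemma pv_fence_not_opens (line : String)
    (h : PySem.Str.startswith (PySem.Str.strip line) "```" = true) :
    pvOpensEntry line = false := by
  have hc : ['`', '`', '`'] <+: PySem.Chars.strip line.toList := by
    have h' := h
    simp [PySem.Chars.startswith_iff] at h'
    exact h'
  obtain ⟨t, ht⟩ := hc
  have h1 : PySem.Chars.startswith (PySem.Chars.strip line.toList) ['*', ' '] = false := by
    rw [Bool.eq_false_iff]
    intro hp
    rw [PySem.Chars.startswith_iff, ← ht] at hp
    simp [List.cons_prefix_cons] at hp
  have h2 : PySem.Chars.startswith (PySem.Chars.strip line.toList) ['#', ' '] = false := by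
    rw [Bool.eq_false_iff]
    intro hp
    rw [PySem.Chars.startswith_iff, ← ht] at hp
    simp [List.cons_prefix_cons] at hp
  simp [pvOpensEntry, h1, h2]

lemma pvBApply_snoc (e c b : List String) (d0 : String) (dr : List String) (x : String) :
    pvBApply (e, c) (b, d0 :: (dr ++ [x])) =
      ((pvBApply (e, c) (b, d0 :: dr)).1, (pvBApply (e, c) (b, d0 :: dr)).2 ++ [x]) := by
  simp only [pvBApply]
  by_cases h : (!b.isEmpty && pvOpensEntry d0) = true <;> simp [h, List.append_assoc]

lemma pvAStep_flat_fence (e c b d : List String) (icb : Bool) (line : String)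
    (hf : PySem.Str.startswith (PySem.Str.strip line) "```" = true) :
    pvAStep (pvFlat e c b d icb) line = pvFlat e c b (d ++ [line]) (!icb) := by
  have ho := pv_fence_not_opens line hf
  have hfx := hf
  simp at hfx
  cases d with
  | nil =>
    by_cases hbe : b.isEmpty
    · have hb0 : b = [] := List.isEmpty_iff.mp hbe
      subst hb0
      simp [pvFlat, pvAStep, pvBApply, hfx, ho]
    · simp [pvFlat, pvAStep, pvBApply, hfx, ho, hbe]
  | cons d0 dr =>
    simp only [pvFlat, List.cons_append, pvBApply_snoc]
    simp [pvAStep, hfx]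

lemma pvAStep_flat_body (e c b : List String) (d0 : String) (dr : List String) (icb : Bool) (line : String)
    (hf : PySem.Str.startswith (PySem.Str.strip line) "```" = false)
    (h : icb = true ∨ (PySem.Str.strip line == "") = false) :
    pvAStep (pvFlat e c b (d0 :: dr) icb) line = pvFlat e c b ((d0 :: dr) ++ [line]) icb := by
  have hfx := hf
  simp at hfx
  simp only [pvFlat, List.cons_append, pvBApply_snoc]
  rcases h with h | h
  · subst h
    simp [pvAStep, hfx]
  · have hbx : ¬ PySem.Str.strip line = "" := by simpa using h
    cases icb <;> simp [pvAStep, hfx, hbx]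

lemma pvAStep_flat_text_nil (e c b : List String) (line : String)
    (hf : PySem.Str.startswith (PySem.Str.strip line) "```" = false)
    (hb : (PySem.Str.strip line == "") = false) :
    pvAStep (pvFlat e c b [] false) line = pvFlat e c b [line] false := by
  have hfx := hf
  simp at hfx
  have hbx : ¬ PySem.Str.strip line = "" := by simpa using hb
  by_cases hbe : b.isEmpty
  · have hb0 : b = [] := List.isEmpty_iff.mp hbe
    subst hb0
    simp [pvFlat, pvAStep, pvBApply, hfx, hbx]
  · by_cases h1 : PySem.Chars.startswith line.toList [' ', ' ', ' ', ' '] = true <;>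
      by_cases h2 : PySem.Chars.startswith line.toList ['\t'] = true <;>
        by_cases h3 : PySem.Chars.startswith (PySem.Chars.strip line.toList) ['*', ' '] = true <;>
          by_cases h4 : PySem.Chars.startswith (PySem.Chars.strip line.toList) ['#', ' '] = true <;>
            simp [pvFlat, pvAStep, pvBApply, pvOpensEntry, hfx, hbx, hbe, h1, h2, h3, h4]

lemma pvAStep_flat_blank_nil (e c b : List String) (line : String)
    (hf : PySem.Str.startswith (PySem.Str.strip line) "```" = false)
    (hb : (PySem.Str.strip line == "") = true) :
    pvAStep (pvFlat e c b [] false) line = pvFlat e c (b ++ [line]) [] false := by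
  have hfx := hf
  simp at hfx
  have hbx : PySem.Str.strip line = "" := by simpa using hb
  have hz : PySem.Chars.startswith ([] : List Char) ['`', '`', '`'] = false := by decide
  simp [pvFlat, pvAStep, hbx, hz]

lemma pvAStep_flat_blank_cons (e c b : List String) (d0 : String) (dr : List String) (line : String)
    (hf : PySem.Str.startswith (PySem.Str.strip line) "```" = false)
    (hb : (PySem.Str.strip line == "") = true) :
    pvAStep (pvFlat e c b (d0 :: dr) false) line =
      pvFlat (pvBApply (e, c) (b, d0 :: dr)).1 (pvBApply (e, c) (b, d0 :: dr)).2 [line] [] false := by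
  have hfx := hf
  simp at hfx
  have hbx : PySem.Str.strip line = "" := by simpa using hb
  have hz : PySem.Chars.startswith ([] : List Char) ['`', '`', '`'] = false := by decide
  simp [pvFlat, pvAStep, hbx, hz]

lemma pv_main (lines : List String) :
    ∀ (icb : Bool) (b d e c : List String), (icb = true → d ≠ []) →
    pvAFin (lines.foldl pvAStep (pvFlat e c b d icb)) =
      pvBFin ((((lines.foldl pvBCut ([], b, d, icb)).1) ++
        [((lines.foldl pvBCut ([], b, d, icb)).2.1, (lines.foldl pvBCut ([], b, d, icb)).2.2.1)]).foldl
        pvBApply (e, c)) := by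
  induction lines with
  | nil =>
    intro icb b d e c _
    cases d with
    | nil => simp [pvFlat, pvAFin, pvBFin, pvBApply]
    | cons d0 dr =>
      rcases hq : pvBApply (e, c) (b, d0 :: dr) with ⟨E, C⟩
      simp [pvFlat, pvAFin, pvBFin, hq]
  | cons line rest ih =>
    intro icb b d e c hicb
    simp only [List.foldl_cons]
    by_cases hf : PySem.Str.startswith (PySem.Str.strip line) "```" = true
    · -- code fence: toggles the code flag, extends the body
      have hfx := hf
      simp at hfx
      rw [pvAStep_flat_fence e c b d icb line hf,
        show pvBCut ([], b, d, icb) line = ([], b, d ++ [line], !icb) from by simp [pvBCut, hfx]]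
      exact ih (!icb) b (d ++ [line]) e c (by simp)
    · have hf' : PySem.Str.startswith (PySem.Str.strip line) "```" = false := by
        simpa using hf
      have hfx := hf'
      simp at hfx
      cases icb with
      | true =>
        -- inside a code block: every line extends the body
        obtain ⟨d0, dr, rfl⟩ : ∃ d0 dr, d = d0 :: dr := by
          rcases d with _ | ⟨d0, dr⟩
          · exact absurd (hicb rfl) (by simp)
          · exact ⟨d0, dr, rfl⟩
        rw [pvAStep_flat_body e c b d0 dr true line hf' (Or.inl rfl),
          show pvBCut ([], b, d0 :: dr, true) line = ([], b, (d0 :: dr) ++ [line], true) from by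
            simp [pvBCut, hfx]]
        exact ih true b ((d0 :: dr) ++ [line]) e c (by simp)
      | false =>
        by_cases hb : (PySem.Str.strip line == "") = true
        · -- blank line outside code
          have hbx : PySem.Str.strip line = "" := by simpa using hb
          have hz : PySem.Chars.startswith ([] : List Char) ['`', '`', '`'] = false := by decide
          cases d with
          | nil =>
            rw [pvAStep_flat_blank_nil e c b line hf' hb,
              show pvBCut ([], b, [], false) line = ([], b ++ [line], [], false) from by
                simp [pvBCut, hbx, hz]]
            exact ih false (b ++ [line]) [] e c (by simp)
          | cons d0 dr =>
            rw [pvAStep_flat_blank_cons e c b d0 dr line hf' hb,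
              show pvBCut ([], b, d0 :: dr, false) line = ([(b, d0 :: dr)], [line], [], false) from by
                simp [pvBCut, hbx, hz]]
            rw [pvBCut_blocks rest [(b, d0 :: dr)] [line] [] false]
            rcases hr : rest.foldl pvBCut ([], [line], [], false) with ⟨bs, bb, bd, ic⟩
            have hih := ih false [line] [] (pvBApply (e, c) (b, d0 :: dr)).1
              (pvBApply (e, c) (b, d0 :: dr)).2 (by simp)
            rw [hr] at hih
            simpa [List.foldl_cons] using hih
        · -- ordinary content line outside code
          have hb' : (PySem.Str.strip line == "") = false := by simpa using hb
          have hbx : ¬ PySem.Str.strip line = "" := by simpa using hb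
          have hstep : pvAStep (pvFlat e c b d false) line = pvFlat e c b (d ++ [line]) false := by
            cases d with
            | nil => exact pvAStep_flat_text_nil e c b line hf' hb'
            | cons d0 dr => exact pvAStep_flat_body e c b d0 dr false line hf' (Or.inr hb')
          rw [hstep,
            show pvBCut ([], b, d, false) line = ([], b, d ++ [line], false) from by
              simp [pvBCut, hfx, hbx]]
          exact ih false b (d ++ [line]) e c (by simp)

-- ===== VERDICT =====
theorem parse_changelog_entries_spec : Claim_equal_parse_changelog_entries := by
  intro text _
  unfold Spec_parse_changelog_entries parse_changelog_entries parse_changelog_entries_alt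
  have h := pv_main ((PySem.Str.split? text "\n").getD []) false [] [] [] [] (by simp)
  rcases hr : ((PySem.Str.split? text "\n").getD []).foldl pvBCut ([], [], [], false) with ⟨bs, bb, bd, ic⟩
  rw [hr] at h
  simpa [pvFlat] using h
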